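-- pv_equiv track=rewrite | github.com/Nihar04/CNLAB | Framing/Bit Stuffing.py | bit_unstuffing
-- ===== SOURCE A (Python) =====
-- def bit_unstuffing(stuffed_data):
--     # Define the bit pattern to be unstuffed (e.g., '11111')
--     pattern = '11111'
--
--     # Define the bit to be removed (usually '0')
--     stuffed_bit = '0'
--
--     unstuffed_data = ''
--     count = 0
--
--     i = 0
--     while i < len(stuffed_data):
--         bit = stuffed_data[i]
--         if bit == '1':
--             count += 1
--         else:
--             count = 0
--
--         unstuffed_data += bit
--
--         if count == len(pattern):
--             # Skip the stuffed bit
--             i += 1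
--             count = 0
--
--         i += 1
--
--     return unstuffed_data
-- ===== SOURCE B (Python) =====
-- def bit_unstuffing(stuffed_data):
--     # Window scan: whenever five '1's are followed by one more character,
--     # emit the five '1's and jump past the stuffed character; else copy one char.
--     out = []
--     i = 0
--     n = len(stuffed_data)
--     while i < n:
--         if stuffed_data[i] == '1' and stuffed_data[i + 1:i + 5] == '1111' and i + 5 < n:
--             out.append('11111')
--             i += 6
--         else:
--             out.append(stuffed_data[i])
--             i += 1
--     return ''.join(out)
-- ===== Notes on version B (the rewrite author's own statement) =====
-- stated objective: faster
-- what changed: Replaces the per-character counter with a five-character window match that emits the whole '11111' chunk and jumps six positions past the stuffed bit, collecting pieces in a list joined once instead of quadratic string += concatenation.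
import Mathlib
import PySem

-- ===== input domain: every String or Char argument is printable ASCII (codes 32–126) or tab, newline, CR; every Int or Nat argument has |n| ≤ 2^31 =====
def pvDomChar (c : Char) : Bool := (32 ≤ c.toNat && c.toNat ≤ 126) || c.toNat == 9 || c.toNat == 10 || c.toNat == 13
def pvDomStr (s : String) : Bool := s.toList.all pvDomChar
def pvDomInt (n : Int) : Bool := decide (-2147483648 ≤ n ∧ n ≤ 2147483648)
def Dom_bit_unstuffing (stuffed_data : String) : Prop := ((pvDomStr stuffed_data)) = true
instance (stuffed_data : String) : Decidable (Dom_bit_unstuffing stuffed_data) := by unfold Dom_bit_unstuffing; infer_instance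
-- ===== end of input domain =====

-- B replaces A's per-character counter with a five-'1' window match that jumps past the
-- stuffed character; alternative structure, same O(n) scan in Lean.

-- ===== PORT A =====
-- A's while loop: running count of consecutive '1's; after appending the fifth '1' the
-- next character (any character) is skipped and the count resets.
def pvALoop : List Char → Nat → List Char
  | [], _ => []
  | b :: rest, count =>
    let count' := if b = '1' then count + 1 else 0
    if count' = 5 then b :: pvALoop (rest.drop 1) 0
    else b :: pvALoop rest count'
termination_by l _ => l.length
decreasing_by all_goals simp

def bit_unstuffing (stuffed_data : String) : String :=
  String.ofList (pvALoop stuffed_data.toList 0)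

-- ===== PORT B =====
-- B's while loop: at each position, if the current char is '1', the next four chars are
-- '1111' and a sixth char exists, emit '11111' and skip six chars; else copy one char.
def pvBLoop : List Char → List Char
  | [] => []
  | b :: t =>
    if b = '1' ∧ t.take 4 = List.replicate 4 '1' ∧ 5 ≤ t.length then
      '1' :: '1' :: '1' :: '1' :: '1' :: pvBLoop (t.drop 5)
    else b :: pvBLoop t
termination_by l => l.length
decreasing_by all_goals simp

def bit_unstuffing_alt (stuffed_data : String) : String :=
  String.ofList (pvBLoop stuffed_data.toList)

-- ===== PRECONDITION & SPEC =====
def Spec_bit_unstuffing (stuffed_data : String) (out : String) : Prop := out = bit_unstuffing_alt stuffed_data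
instance (stuffed_data : String) (out : String) : Decidable (Spec_bit_unstuffing stuffed_data out) := by unfold Spec_bit_unstuffing; infer_instance

-- ===== CLAIM (what is proved, stated in full; the proofs are below) =====
def Claim_equal_bit_unstuffing : Prop := ∀ (stuffed_data : String), Dom_bit_unstuffing stuffed_data → Spec_bit_unstuffing stuffed_data (bit_unstuffing stuffed_data)

-- ===== LEMMAS AND PROOFS =====

-- A list shorter than 6 characters can never contain '11111' followed by a character.
theorem pvBLoop_short (l : List Char) (h : l.length ≤ 5) : pvBLoop l = l := by
  induction l with
  | nil => simp [pvBLoop]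
  | cons b t ih =>
    rw [pvBLoop]
    have ht : t.length ≤ 4 := by simp at h; omega
    rw [if_neg (by rintro ⟨-, -, h5⟩; omega)]
    rw [ih (by omega)]

-- Main invariant: with `c ≤ 4` ones already counted by A, B run on those ones prepended
-- to the rest produces the ones followed by A's continuation.
-- With `c ≤ 3` leading ones and then a non-'1' character, B never matches inside the prefix.
theorem pvBLoop_pre (b : Char) (hb : b ≠ '1') (t : List Char) :
    ∀ c, c ≤ 4 → pvBLoop (List.replicate c '1' ++ b :: t) = List.replicate c '1' ++ pvBLoop (b :: t) := by
  intro c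
  induction c with
  | zero => simp
  | succ c ih =>
    intro hc
    have hc' : c ≤ 3 := by omega
    rw [List.replicate_succ, List.cons_append, pvBLoop]
    rw [if_neg ?_]
    · rw [ih (by omega)]; simp
    · rintro ⟨-, h4, -⟩
      -- b sits among the first 4 characters of the tail, contradicting all-'1'
      have : b ∈ List.take 4 (List.replicate c '1' ++ b :: t) := by
        interval_cases c <;> simp [List.replicate]
      rw [h4] at this
      exact hb (by simpa using this)

theorem pv_main (n : Nat) : ∀ (l : List Char) (c : Nat), l.length ≤ n → c ≤ 4 →
    pvBLoop (List.replicate c '1' ++ l) = List.replicate c '1' ++ pvALoop l c := by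
  induction n with
  | zero =>
    intro l c hl hc
    have : l = [] := List.eq_nil_of_length_eq_zero (by omega)
    subst this
    rw [pvALoop, pvBLoop_short _ (by simp; omega), List.append_nil]
  | succ n ih =>
    intro l c hl hc
    match l with
    | [] => rw [pvALoop, pvBLoop_short _ (by simp; omega), List.append_nil]
    | b :: t =>
      by_cases hb : b = '1'
      · subst hb
        have e : pvALoop ('1' :: t) c =
            if c + 1 = 5 then '1' :: pvALoop (t.drop 1) 0 else '1' :: pvALoop t (c + 1) := by
          rw [pvALoop]; simp
        by_cases h5 : c = 4
        · subst h5
          -- the fifth '1': A emits it and skips the next character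
          rw [e, if_pos rfl]
          have hrep : List.replicate 4 '1' ++ '1' :: t = List.replicate 5 '1' ++ t := by
            simp [List.replicate_succ' (n := 4)]
          rw [hrep]
          match t with
          | [] =>
            rw [pvBLoop_short _ (by simp)]
            simp [pvALoop, List.replicate_succ' (n := 4)]
          | x :: t' =>
            rw [show List.replicate 5 '1' ++ x :: t' = '1' :: (List.replicate 4 '1' ++ x :: t') by simp [List.replicate]]
            rw [pvBLoop, if_pos ⟨rfl, by simp, by simp⟩]
            have ht' : t'.length ≤ n := by simp at hl; omega
            have := ih t' 0 ht' (by omega)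
            simp only [List.replicate, List.nil_append] at this
            simp [this]
        · -- count goes to c+1 < 5
          rw [e, if_neg (by omega : ¬ (c + 1 = 5))]
          have hrep : List.replicate c '1' ++ '1' :: t = List.replicate (c + 1) '1' ++ t := by
            simp [List.replicate_succ' (n := c)]
          rw [hrep, ih t (c + 1) (by simp at hl; omega) (by omega)]
          simp [List.replicate_succ' (n := c)]
      · -- non-'1' resets the count
        have e : pvALoop (b :: t) c = b :: pvALoop t 0 := by
          rw [pvALoop]; simp [hb]
        rw [e]
        rw [pvBLoop_pre b hb t c hc, pvBLoop, if_neg (by rintro ⟨h, -⟩; exact hb h)]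
        have := ih t 0 (by simp at hl; omega) (by omega)
        simp only [List.replicate, List.nil_append] at this
        rw [this]

-- ===== VERDICT (by name: the statement is the Claim_ definition above) =====
theorem bit_unstuffing_spec : Claim_equal_bit_unstuffing := by
  intro s _
  unfold Spec_bit_unstuffing bit_unstuffing bit_unstuffing_alt
  have := pv_main s.toList.length s.toList 0 le_rfl (by omega)
  simp only [List.replicate, List.nil_append] at this
  rw [this]
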